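-- pv_equiv track=rewrite | github.com/johntordj241/ProbaEdge | utils/match_filter.py | resolve_bookmakers
-- ===== SOURCE A (Python) =====
-- from typing import Any, Dict, Iterable, List, Optional
--
-- BOOKMAKER_PRESETS: Dict[str, set[str]] = {
--     "Betclic": {"betclic", "betclicfr"},
--     "ParionsSport": {"parionssport", "parionssportfdj", "fdjparionssport", "parionssportfr"},
-- }
--
-- def normalize_bookmaker(name: str) -> str:
--     return "".join(ch for ch in name.lower() if ch.isalnum())
--
-- def build_alias_lookup(custom_aliases: Optional[Dict[str, Iterable[str]]] = None) -> Dict[str, set[str]]: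
--     lookup: Dict[str, set[str]] = {}
--     for label, aliases in BOOKMAKER_PRESETS.items():
--         tokens = {normalize_bookmaker(label)}
--         tokens.update(normalize_bookmaker(alias) for alias in aliases)
--         lookup[label] = tokens
--     if custom_aliases:
--         for label, aliases in custom_aliases.items():
--             tokens = {normalize_bookmaker(label)}
--             for alias in aliases:
--                 tokens.add(normalize_bookmaker(alias))
--             lookup[label] = tokens
--     return lookup
--
-- def resolve_bookmakers(labels: Iterable[str], custom_aliases: Optional[Dict[str, Iterable[str]]] = None) -> set[str]:
--     lookup = build_alias_lookup(custom_aliases)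
--     resolved: set[str] = set()
--     for label in labels:
--         tokens = lookup.get(label)
--         if tokens:
--             resolved.update(tokens)
--         else:
--             resolved.add(normalize_bookmaker(label))
--     return resolved
-- ===== SOURCE B (Python) =====
-- from typing import Dict, Iterable, List, Optional
--
-- BOOKMAKER_PRESETS: Dict[str, set] = {
--     "Betclic": {"betclic", "betclicfr"},
--     "ParionsSport": {"parionssport", "parionssportfdj", "fdjparionssport", "parionssportfr"},
-- }
--
-- def normalize_bookmaker(name: str) -> str:
--     return "".join(ch for ch in name.lower() if ch.isalnum())
--
-- def resolve_bookmakers(labels, custom_aliases=None):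
--     # No prebuilt alias table: resolve each label on demand, custom aliases first.
--     resolved = set()
--     for label in labels:
--         resolved.add(normalize_bookmaker(label))
--         if custom_aliases and label in custom_aliases:
--             for alias in custom_aliases[label]:
--                 resolved.add(normalize_bookmaker(alias))
--         elif label in BOOKMAKER_PRESETS:
--             for alias in BOOKMAKER_PRESETS[label]:
--                 resolved.add(normalize_bookmaker(alias))
--     return resolved
-- ===== Notes on version B (the rewrite author's own statement) =====
-- stated objective: simpler
-- what changed: B drops build_alias_lookup entirely: instead of prebuilding the whole preset+custom alias table as normalized token sets and looking labels up in it, B makes a single pass over labels and resolves each label on demand (custom dict first, then presets, else just the normalized label), normalizing only the alias entries that are actually referenced.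
import Mathlib
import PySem

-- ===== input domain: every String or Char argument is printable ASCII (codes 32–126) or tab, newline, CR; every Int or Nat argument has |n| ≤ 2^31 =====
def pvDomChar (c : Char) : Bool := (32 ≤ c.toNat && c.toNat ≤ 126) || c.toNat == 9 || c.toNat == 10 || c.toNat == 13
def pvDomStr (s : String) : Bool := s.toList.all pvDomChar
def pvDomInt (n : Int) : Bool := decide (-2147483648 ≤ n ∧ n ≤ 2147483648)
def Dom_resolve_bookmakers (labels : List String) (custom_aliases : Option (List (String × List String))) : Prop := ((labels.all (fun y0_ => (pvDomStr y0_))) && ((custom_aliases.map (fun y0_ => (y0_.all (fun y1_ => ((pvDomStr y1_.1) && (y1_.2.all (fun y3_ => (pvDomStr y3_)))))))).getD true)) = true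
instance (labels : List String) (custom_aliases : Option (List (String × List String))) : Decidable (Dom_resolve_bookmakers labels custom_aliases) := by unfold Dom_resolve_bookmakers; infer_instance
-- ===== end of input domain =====

-- B drops the prebuilt alias table and resolves each label on demand (custom aliases first); objective: simpler.
-- A returns a Python set; the Lean ports return its element list in first-insertion order.


-- ===== PORT A =====
def pvPresets : List (String × List String) :=
  [("Betclic", ["betclic", "betclicfr"]),
   ("ParionsSport", ["parionssport", "parionssportfdj", "fdjparionssport", "parionssportfr"])]

def pv_normalize (name : String) : String :=
  String.ofList ((PySem.Chars.lower name.toList).filter PySem.Chars.isalnum)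

-- tokens = {normalize(label)}; tokens.update(normalize(alias) for alias in aliases)
def pv_preset_tokens (label : String) (aliases : List String) : PySem.Set String :=
  PySem.Set.update (PySem.Set.add PySem.Set.empty (pv_normalize label)) (aliases.map pv_normalize)

-- tokens = {normalize(label)}; for alias in aliases: tokens.add(normalize(alias))
def pv_custom_tokens (label : String) (aliases : List String) : PySem.Set String :=
  aliases.foldl (fun t a => PySem.Set.add t (pv_normalize a))
    (PySem.Set.add PySem.Set.empty (pv_normalize label))

def build_alias_lookup (custom_aliases : Option (List (String × List String))) :
    PySem.Dict String (PySem.Set String) :=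
  let lookup := pvPresets.foldl (fun d p => d.insert p.1 (pv_preset_tokens p.1 p.2)) PySem.Dict.empty
  match custom_aliases with
  | none => lookup
  | some l => if l.isEmpty then lookup
      else l.foldl (fun d p => d.insert p.1 (pv_custom_tokens p.1 p.2)) lookup

def resolve_bookmakers (labels : List String) (custom_aliases : Option (List (String × List String))) : List String :=
  let lookup := build_alias_lookup custom_aliases
  labels.foldl (fun resolved label =>
    match lookup.get? label with
    | some tokens =>
        if tokens.isEmpty then PySem.Set.add resolved (pv_normalize label)
        else PySem.Set.update resolved tokens
    | none => PySem.Set.add resolved (pv_normalize label)) PySem.Set.empty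

-- ===== PORT B =====
def b_normalize (name : String) : String :=
  String.ofList ((PySem.Chars.lower name.toList).filter PySem.Chars.isalnum)

-- "custom_aliases and label in custom_aliases" fused with the lookup "custom_aliases[label]"
def b_custom_get (custom_aliases : Option (List (String × List String))) (label : String) :
    Option (List String) :=
  match custom_aliases with
  | none => none
  | some l => if l.isEmpty then none else (PySem.Dict.mk l).get? label

def resolve_bookmakers_alt (labels : List String) (custom_aliases : Option (List (String × List String))) : List String :=
  labels.foldl (fun resolved label =>
    let r := PySem.Set.add resolved (b_normalize label)
    match b_custom_get custom_aliases label with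
    | some aliases => aliases.foldl (fun r a => PySem.Set.add r (b_normalize a)) r
    | none =>
      match (PySem.Dict.mk pvPresets).get? label with
      | some aliases => aliases.foldl (fun r a => PySem.Set.add r (b_normalize a)) r
      | none => r) PySem.Set.empty

-- ===== PRECONDITION & SPEC =====
-- Pre_ excludes only association lists with duplicate keys in custom_aliases, which cannot arise
-- from a Python dict (A's table build would keep the last duplicate, B's lookup the first).
def Pre_resolve_bookmakers (labels : List String) (custom_aliases : Option (List (String × List String))) : Prop :=
  ((custom_aliases.getD []).map Prod.fst).Nodup
instance (labels : List String) (custom_aliases : Option (List (String × List String))) : Decidable (Pre_resolve_bookmakers labels custom_aliases) := by unfold Pre_resolve_bookmakers; infer_instance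

def pvWitness_resolve_bookmakers : List String × (Option (List (String × List String))) :=
  (["Betclic", "My Book!"], some [("My Book!", ["MB", "mybook"])])

def Spec_resolve_bookmakers (labels : List String) (custom_aliases : Option (List (String × List String))) (out : List String) : Prop := out = resolve_bookmakers_alt labels custom_aliases
instance (labels : List String) (custom_aliases : Option (List (String × List String))) (out : List String) : Decidable (Spec_resolve_bookmakers labels custom_aliases out) := by unfold Spec_resolve_bookmakers; infer_instance

-- ===== CLAIM (what is proved, stated in full; the proofs are below) =====
def Claim_equal_resolve_bookmakers : Prop := ∀ (labels : List String) (custom_aliases : Option (List (String × List String))), Dom_resolve_bookmakers labels custom_aliases → Pre_resolve_bookmakers labels custom_aliases → Spec_resolve_bookmakers labels custom_aliases (resolve_bookmakers labels custom_aliases)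

-- ===== LEMMAS AND PROOFS =====

theorem update_add (s t : PySem.Set String) (x : String) :
    PySem.Set.update s (PySem.Set.add t x) = PySem.Set.add (PySem.Set.update s t) x := by
  by_cases hx : x ∈ t
  · rw [PySem.Set.add_of_mem hx, PySem.Set.add_of_mem (by rw [PySem.Set.mem_update]; exact Or.inr hx)]
  · rw [PySem.Set.add_of_not_mem hx, PySem.Set.update_append, PySem.Set.update_cons, PySem.Set.update_nil]

theorem update_foldl_add (f : String → String) (l : List String) (s t : PySem.Set String) :
    PySem.Set.update s (l.foldl (fun t a => PySem.Set.add t (f a)) t)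
      = l.foldl (fun r a => PySem.Set.add r (f a)) (PySem.Set.update s t) := by
  induction l generalizing t s with
  | nil => rfl
  | cons a tl ih => simp only [List.foldl_cons]; rw [ih, update_add]

theorem update_custom_tokens (aliases : List String) (s : PySem.Set String) (label : String) :
    PySem.Set.update s (pv_custom_tokens label aliases)
      = aliases.foldl (fun r a => PySem.Set.add r (pv_normalize a)) (PySem.Set.add s (pv_normalize label)) := by
  unfold pv_custom_tokens
  have h1 : PySem.Set.add PySem.Set.empty (pv_normalize label) = [pv_normalize label] := by
    simp [PySem.Set.empty]
  rw [update_foldl_add, h1, PySem.Set.update_cons, PySem.Set.update_nil]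

theorem custom_tokens_ne_nil (label : String) (aliases : List String) :
    pv_custom_tokens label aliases ≠ [] := by
  unfold pv_custom_tokens
  have : ∀ (l : List String) (t : PySem.Set String), t ≠ [] →
      l.foldl (fun t a => PySem.Set.add t (pv_normalize a)) t ≠ [] := by
    intro l
    induction l with
    | nil => intro t ht; exact ht
    | cons a tl ih =>
      intro t ht
      apply ih
      simp only [PySem.Set.add_eq_ite]
      split
      · exact ht
      · simp
  apply this
  simp [PySem.Set.empty]

theorem preset_tokens_eq (label : String) (aliases : List String) :
    pv_preset_tokens label aliases = pv_custom_tokens label aliases := by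
  unfold pv_preset_tokens pv_custom_tokens
  rw [PySem.Set.update_map_eq_foldl_add]

theorem get?_foldl_insert (g : String → List String → PySem.Set String)
    (l : List (String × List String)) (hl : (l.map Prod.fst).Nodup)
    (d : PySem.Dict String (PySem.Set String)) (x : String) :
    (l.foldl (fun d p => d.insert p.1 (g p.1 p.2)) d).get? x
      = match (PySem.Dict.mk l).get? x with
        | some v => some (g x v)
        | none => d.get? x := by
  induction l generalizing d with
  | nil => simp [PySem.Dict.get?]
  | cons p tl ih =>
    obtain ⟨k, v⟩ := p
    simp only [List.map_cons, List.nodup_cons] at hl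
    rw [List.foldl_cons, ih hl.2, PySem.Dict.get?_mk_cons]
    by_cases hk : k = x
    · subst hk
      have hnone : (PySem.Dict.mk tl).get? k = none := by
        rw [PySem.Dict.get?_eq_none_iff_not_mem_keys]
        simpa using hl.1
      rw [hnone]
      simp [PySem.Dict.get?_insert_self]
    · have hb : (k == x) = false := by simp [hk]
      rw [hb]
      cases h : (PySem.Dict.mk tl).get? x with
      | some w => simp
      | none =>
        rw [PySem.Dict.get?_insert]
        simp [Ne.symm hk]

theorem b_normalize_eq : b_normalize = pv_normalize := rfl

-- the per-label step of A equals the per-label step of B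
theorem step_eq (custom_aliases : Option (List (String × List String)))
    (hpre : ((custom_aliases.getD []).map Prod.fst).Nodup)
    (resolved : PySem.Set String) (label : String) :
    (match (build_alias_lookup custom_aliases).get? label with
     | some tokens =>
         if tokens.isEmpty then PySem.Set.add resolved (pv_normalize label)
         else PySem.Set.update resolved tokens
     | none => PySem.Set.add resolved (pv_normalize label))
    = (let r := PySem.Set.add resolved (b_normalize label)
       match b_custom_get custom_aliases label with
       | some aliases => aliases.foldl (fun r a => PySem.Set.add r (b_normalize a)) r
       | none =>
         match (PySem.Dict.mk pvPresets).get? label with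
         | some aliases => aliases.foldl (fun r a => PySem.Set.add r (b_normalize a)) r
         | none => r) := by
  have hpresets : (pvPresets.map Prod.fst).Nodup := by decide
  have hbase : (pvPresets.foldl (fun d p => d.insert p.1 (pv_preset_tokens p.1 p.2)) PySem.Dict.empty).get? label
      = match (PySem.Dict.mk pvPresets).get? label with
        | some v => some (pv_custom_tokens label v)
        | none => none := by
    rw [get?_foldl_insert _ pvPresets hpresets PySem.Dict.empty label]
    cases h : (PySem.Dict.mk pvPresets).get? label with
    | some v => simp [preset_tokens_eq]
    | none => simp [PySem.Dict.get?_empty]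
  -- the shared "no applicable custom alias" shape
  have hnocustom :
      (match (match (PySem.Dict.mk pvPresets).get? label with
              | some v => some (pv_custom_tokens label v)
              | none => none) with
       | some tokens =>
           if tokens.isEmpty then PySem.Set.add resolved (pv_normalize label)
           else PySem.Set.update resolved tokens
       | none => PySem.Set.add resolved (pv_normalize label))
      = (match (PySem.Dict.mk pvPresets).get? label with
         | some aliases => aliases.foldl (fun r a => PySem.Set.add r (b_normalize a))
             (PySem.Set.add resolved (b_normalize label))
         | none => PySem.Set.add resolved (b_normalize label)) := by
    cases h : (PySem.Dict.mk pvPresets).get? label with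
    | some v =>
      simp only [b_normalize_eq, List.isEmpty_eq_false_iff.mpr (custom_tokens_ne_nil label v),
        Bool.false_eq_true, if_false]
      exact update_custom_tokens v resolved label
    | none => rw [b_normalize_eq]
  match custom_aliases with
  | none =>
    show (match (build_alias_lookup none).get? label with
          | some tokens => _ | none => _) = _
    rw [show build_alias_lookup none
        = pvPresets.foldl (fun d p => d.insert p.1 (pv_preset_tokens p.1 p.2)) PySem.Dict.empty from rfl,
      hbase]
    exact hnocustom
  | some l =>
    by_cases hl : l.isEmpty
    · have h1 : build_alias_lookup (some l)
          = pvPresets.foldl (fun d p => d.insert p.1 (pv_preset_tokens p.1 p.2)) PySem.Dict.empty := by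
        simp [build_alias_lookup, hl]
      have h2 : b_custom_get (some l) label = none := by
        simp [b_custom_get, hl]
      rw [h1, hbase, h2]
      exact hnocustom
    · have h1 : build_alias_lookup (some l)
          = l.foldl (fun d p => d.insert p.1 (pv_custom_tokens p.1 p.2))
              (pvPresets.foldl (fun d p => d.insert p.1 (pv_preset_tokens p.1 p.2)) PySem.Dict.empty) := by
        simp [build_alias_lookup, hl]
      have h2 : b_custom_get (some l) label = (PySem.Dict.mk l).get? label := by
        simp [b_custom_get, hl]
      have hnd : (l.map Prod.fst).Nodup := by simpa using hpre
      rw [h1, get?_foldl_insert _ l hnd _ label, h2]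
      cases hc : (PySem.Dict.mk l).get? label with
      | some v =>
        simp only [b_normalize_eq, List.isEmpty_eq_false_iff.mpr (custom_tokens_ne_nil label v),
          Bool.false_eq_true, if_false]
        exact update_custom_tokens v resolved label
      | none =>
        rw [hbase]
        exact hnocustom

-- ===== VERDICT (by name: the statement is the Claim_ definition above) =====
theorem resolve_bookmakers_spec : Claim_equal_resolve_bookmakers := by
  intro labels custom_aliases _ hpre
  show resolve_bookmakers labels custom_aliases = resolve_bookmakers_alt labels custom_aliases
  unfold resolve_bookmakers resolve_bookmakers_alt
  exact List.foldl_ext _ _ _ (fun r label _ => step_eq custom_aliases hpre r label)
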